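-- pv_equiv track=rewrite | github.com/Harabali/Programming1 | lab03.py | fillList
-- ===== SOURCE A (Python) =====
-- def fillList(args):
--     list1 = []
--     list2 = []
--     flag=0
--     for x in args:
--         if x == 'L:':
--             flag += 1
--             continue
--         if flag==1:
--             list1.append(x)
--         if flag==2:
--             list2.append(x)
--     return list1,list2
-- ===== SOURCE B (Python) =====
-- def fillList(args):
--     segments = [[]]
--     for x in args:
--         if x == 'L:':
--             segments.append([])
--         else:
--             segments[-1].append(x)
--     return (segments[1] if len(segments) > 1 else [],
--             segments[2] if len(segments) > 2 else [])
-- ===== Notes on version B (the rewrite author's own statement) =====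
-- stated objective: alternative
-- what changed: B splits the arguments into a list of segments at each 'L:' delimiter and selects segments 1 and 2, replacing A's flag counter with two conditional appends.
import Mathlib
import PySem

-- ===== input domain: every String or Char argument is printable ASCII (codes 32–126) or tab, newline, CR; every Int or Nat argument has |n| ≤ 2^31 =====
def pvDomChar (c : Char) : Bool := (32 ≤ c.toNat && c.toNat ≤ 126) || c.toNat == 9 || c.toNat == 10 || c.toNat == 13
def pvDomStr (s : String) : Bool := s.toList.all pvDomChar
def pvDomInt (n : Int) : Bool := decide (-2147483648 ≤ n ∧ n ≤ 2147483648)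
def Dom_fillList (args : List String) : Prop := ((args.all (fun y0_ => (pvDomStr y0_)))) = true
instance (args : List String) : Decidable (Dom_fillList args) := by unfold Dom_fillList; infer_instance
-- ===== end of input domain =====

-- B maintains a list of segments split at each 'L:' delimiter instead of A's flag
-- counter with conditional appends; objective: alternative decomposition, same cost.

-- ===== PORT A =====
-- A's loop state: (list1, list2, flag)
def fillListStep (st : List String × List String × Nat) (x : String) :
    List String × List String × Nat :=
  if x == "L:" then (st.1, st.2.1, st.2.2 + 1)
  else
    ((if st.2.2 == 1 then st.1 ++ [x] else st.1),
     (if st.2.2 == 2 then st.2.1 ++ [x] else st.2.1),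
     st.2.2)

def fillList (args : List String) : List String × List String :=
  let st := args.foldl fillListStep ([], [], 0)
  (st.1, st.2.1)

-- ===== PORT B =====
-- B's loop state: the list of segments; segments[-1].append(x) updates the last segment
def fillListAltStep (s : List (List String)) (x : String) : List (List String) :=
  if x == "L:" then s ++ [[]]
  else s.dropLast ++ [s.getLastD [] ++ [x]]

def fillList_alt (args : List String) : List String × List String :=
  let segments := args.foldl fillListAltStep [[]]
  ((if 1 < segments.length then segments.getD 1 [] else []),
   (if 2 < segments.length then segments.getD 2 [] else []))

-- ===== PRECONDITION & SPEC =====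
def Spec_fillList (args : List String) (out : List String × List String) : Prop := out = fillList_alt args
instance (args : List String) (out : List String × List String) : Decidable (Spec_fillList args out) := by unfold Spec_fillList; infer_instance

-- ===== CLAIM (what is proved, stated in full; the proofs are below) =====
def Claim_equal_fillList : Prop := ∀ (args : List String), Dom_fillList args → Spec_fillList args (fillList args)

-- ===== LEMMAS AND PROOFS =====

-- appending an empty segment never changes any getD with default []
theorem getD_append_nil (s : List (List String)) (i : Nat) :
    (s ++ [[]]).getD i [] = s.getD i [] := by
  induction s generalizing i with
  | nil => cases i <;> simp [List.getD]
  | cons a t ih =>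
    cases i with
    | zero => simp [List.getD]
    | succ j => simpa [List.getD] using ih j

-- appending x to the last segment changes only index length-1, where it appends [x]
theorem getD_update_last (s : List (List String)) (hs : s ≠ []) (x : String) (i : Nat) :
    (s.dropLast ++ [s.getLastD [] ++ [x]]).getD i [] =
      (if i = s.length - 1 then s.getD i [] ++ [x] else s.getD i []) := by
  induction s generalizing i with
  | nil => exact absurd rfl hs
  | cons a t ih =>
    cases t with
    | nil => cases i <;> simp [List.getD]
    | cons b u =>
      cases i with
      | zero => simp [List.getD, List.getLastD]
      | succ j =>
        have := ih (by simp) j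
        simpa [List.getD, List.getLastD] using this

-- the central invariant relating A's (l1, l2, flag) to B's segments
theorem loop_invariant (args : List String) (s : List (List String))
    (l1 l2 : List String) (flag : Nat)
    (hlen : s.length = flag + 1)
    (h1 : s.getD 1 [] = l1) (h2 : s.getD 2 [] = l2) :
    (args.foldl fillListStep (l1, l2, flag)).1 = (args.foldl fillListAltStep s).getD 1 []
    ∧ (args.foldl fillListStep (l1, l2, flag)).2.1 = (args.foldl fillListAltStep s).getD 2 [] := by
  induction args generalizing s l1 l2 flag with
  | nil =>
    simp only [List.foldl_nil]
    exact ⟨by simp [List.getD, ← h1], by simp [List.getD, ← h2]⟩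
  | cons x rest ih =>
    simp only [List.foldl_cons]
    by_cases hx : x == "L:"
    · simp only [fillListStep, fillListAltStep, hx, if_pos]
      exact ih (s ++ [[]]) l1 l2 (flag + 1) (by simp [hlen])
        (by rw [getD_append_nil]; exact h1) (by rw [getD_append_nil]; exact h2)
    · simp only [fillListStep, fillListAltStep, hx, if_neg, Bool.false_eq_true,
        not_false_eq_true]
      have hs : s ≠ [] := by intro h; simp [h] at hlen
      refine ih _ _ _ flag ?_ ?_ ?_
      · simp only [List.length_append, List.length_dropLast, List.length_singleton]
        omega
      · rw [getD_update_last s hs x 1, hlen, h1]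
        rcases flag with _ | _ | f <;> simp
      · rw [getD_update_last s hs x 2, hlen, h2]
        rcases flag with _ | _ | f <;> simp

theorem getD_oob (s : List (List String)) (i : Nat) (h : ¬ i < s.length) :
    s.getD i [] = [] :=
  List.getD_eq_default _ _ (Nat.le_of_not_lt h)

-- ===== VERDICT (by name: the statement is the Claim_ definition above) =====
theorem fillList_spec : Claim_equal_fillList := by
  intro args _
  unfold Spec_fillList fillList fillList_alt
  have h := loop_invariant args [[]] [] [] 0 (by simp) (by simp [List.getD]) (by simp [List.getD])
  set sf := args.foldl fillListAltStep [[]] with hsf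
  refine Prod.ext ?_ ?_
  · simp only
    rw [h.1]
    split
    · rfl
    · next hlt => rw [getD_oob _ _ hlt]
  · simp only
    rw [h.2]
    split
    · rfl
    · next hlt => rw [getD_oob _ _ hlt]
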